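-- pv_equiv track=rewrite | github.com/Musa-Riaz/Delusion | src/ranking.py | intersection_multiplier
-- ===== SOURCE A (Python) =====
-- def intersection_multiplier(doc, intersections):
--     # for multi-word queries, intersections contains cuwemulative intersections of all the words
--     # more detail in search_util.py
--     multiplier = 1
--     for i in range(len(intersections) - 1, 0, -1):     # loop from last intersection (which is an intersection of all words)
--         if doc[0] in intersections[i]:
--             # multiplier is higher for the order of intersection the document is found in
--             if intersections[i][doc[0]]:
--                 return (i + 1) * 100        # intersection is in title/url/authors/tags
--             if multiplier == 1:
--                 multiplier = (i + 1) * 2    # in case a later intersection contains relevant hits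
--     return multiplier
-- ===== SOURCE B (Python) =====
-- # Accumulate-then-decide: collect truthy-hit and plain-hit indices over range(1, n), then decide from their maxima (instead of a descending early-return scan).
-- def intersection_multiplier(doc, intersections):
--     key = doc[0]
--     truthy = [i for i in range(1, len(intersections))
--               if key in intersections[i] and intersections[i][key]]
--     if truthy:
--         return (max(truthy) + 1) * 100
--     present = [i for i in range(1, len(intersections)) if key in intersections[i]]
--     if present:
--         return (max(present) + 1) * 2
--     return 1
-- ===== Notes on version B (the rewrite author's own statement) =====
-- stated objective: alternative
-- what changed: Replaced A's descending early-return scan with a comprehension-style accumulate-then-decide: collect the matching indices (truthy hits and plain hits) over range(1, n) and decide from their maxima.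
import Mathlib
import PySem

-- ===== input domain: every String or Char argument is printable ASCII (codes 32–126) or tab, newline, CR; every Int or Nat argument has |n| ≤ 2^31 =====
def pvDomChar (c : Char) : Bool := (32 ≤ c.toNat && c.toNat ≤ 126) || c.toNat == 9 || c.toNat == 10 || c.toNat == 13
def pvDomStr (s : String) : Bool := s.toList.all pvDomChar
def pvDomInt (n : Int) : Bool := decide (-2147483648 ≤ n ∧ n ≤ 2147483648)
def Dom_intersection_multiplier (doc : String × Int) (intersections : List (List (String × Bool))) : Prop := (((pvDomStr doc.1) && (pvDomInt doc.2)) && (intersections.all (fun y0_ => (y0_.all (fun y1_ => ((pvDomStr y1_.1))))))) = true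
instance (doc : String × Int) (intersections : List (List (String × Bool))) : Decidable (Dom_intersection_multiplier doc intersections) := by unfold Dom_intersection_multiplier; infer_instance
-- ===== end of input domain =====

-- B replaces A's descending early-return scan with an accumulate-then-decide formulation (collect matching indices, decide from their maxima); objective: alternative, same cost.


-- ===== PORT A =====
-- descending loop i = n-1, n-2, …, 1; state is `multiplier`; early return on a truthy hit
def pvLoopA (key : String) (xs : List (List (String × Bool))) : Nat → Int → Int
  | 0, mult => mult
  | i + 1, mult =>
    match (xs.getD (i + 1) []).lookup key with
    | some v =>
      if v then ((i : Int) + 2) * 100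
      else pvLoopA key xs i (if mult = 1 then ((i : Int) + 2) * 2 else mult)
    | none => pvLoopA key xs i mult

def intersection_multiplier (doc : String × Int) (intersections : List (List (String × Bool))) : Int :=
  pvLoopA doc.1 intersections (intersections.length - 1) 1

-- ===== PORT B =====
def intersection_multiplier_alt (doc : String × Int) (intersections : List (List (String × Bool))) : Int :=
  let key := doc.1
  let truthy := ((List.range intersections.length).drop 1).filter
    (fun i => (intersections.getD i []).lookup key == some true)
  match truthy.max? with
  | some j => ((j : Int) + 1) * 100
  | none =>
    let present := ((List.range intersections.length).drop 1).filter
      (fun i => ((intersections.getD i []).lookup key).isSome)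
    match present.max? with
    | some j => ((j : Int) + 1) * 2
    | none => 1

-- ===== PRECONDITION & SPEC =====
def Spec_intersection_multiplier (doc : String × Int) (intersections : List (List (String × Bool))) (out : Int) : Prop := out = intersection_multiplier_alt doc intersections
instance (doc : String × Int) (intersections : List (List (String × Bool))) (out : Int) : Decidable (Spec_intersection_multiplier doc intersections out) := by unfold Spec_intersection_multiplier; infer_instance

-- ===== CLAIM (what is proved, stated in full; the proofs are below) =====
def Claim_equal_intersection_multiplier : Prop := ∀ (doc : String × Int) (intersections : List (List (String × Bool))), Dom_intersection_multiplier doc intersections → Spec_intersection_multiplier doc intersections (intersection_multiplier doc intersections)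

-- ===== LEMMAS AND PROOFS =====

-- indices 1..i (the part of range(1, n) already processed when the descending loop is at i)
def pvT (key : String) (xs : List (List (String × Bool))) (i : Nat) : List Nat :=
  ((List.range (i + 1)).drop 1).filter (fun j => (xs.getD j []).lookup key == some true)

def pvP (key : String) (xs : List (List (String × Bool))) (i : Nat) : List Nat :=
  ((List.range (i + 1)).drop 1).filter (fun j => ((xs.getD j []).lookup key).isSome)

def pvDecide (key : String) (xs : List (List (String × Bool))) (i : Nat) (m : Int) : Int :=
  match (pvT key xs i).max? with
  | some j => ((j : Int) + 1) * 100
  | none =>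
    if m = 1 then
      match (pvP key xs i).max? with
      | some j => ((j : Int) + 1) * 2
      | none => 1
    else m

theorem pv_range_drop_succ (i : Nat) :
    (List.range (i + 2)).drop 1 = (List.range (i + 1)).drop 1 ++ [i + 1] := by
  rw [List.range_succ, List.drop_append_of_le_length (by simp)]

theorem pv_max?_lt_append (l : List Nat) (a : Nat) (h : ∀ x ∈ l, x < a) :
    (l ++ [a]).max? = some a := by
  induction l with
  | nil => rfl
  | cons b t ih =>
    have hb := h b (by simp)
    have ht := ih (fun x hx => h x (by simp [hx]))
    simp [List.max?_cons, ht] at *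
    omega

theorem pv_mem_pvT_lt (key : String) (xs : List (List (String × Bool))) (i : Nat) :
    ∀ x ∈ pvT key xs i, x < i + 1 := by
  intro x hx
  have := List.mem_filter.mp hx
  have := List.mem_of_mem_drop this.1
  simpa [List.mem_range] using this

theorem pv_mem_pvP_lt (key : String) (xs : List (List (String × Bool))) (i : Nat) :
    ∀ x ∈ pvP key xs i, x < i + 1 := by
  intro x hx
  have := List.mem_filter.mp hx
  have := List.mem_of_mem_drop this.1
  simpa [List.mem_range] using this

theorem pv_loop_eq (key : String) (xs : List (List (String × Bool))) (i : Nat) :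
    ∀ m : Int, pvLoopA key xs i m = pvDecide key xs i m := by
  induction i with
  | zero => intro m; simp [pvLoopA, pvDecide, pvT, pvP, List.range_succ]
  | succ i ih =>
    intro m
    have hT : pvT key xs (i + 1) =
        pvT key xs i ++ List.filter (fun j => (xs.getD j []).lookup key == some true) [i + 1] := by
      unfold pvT
      rw [pv_range_drop_succ, List.filter_append]
    have hP : pvP key xs (i + 1) =
        pvP key xs i ++ List.filter (fun j => ((xs.getD j []).lookup key).isSome) [i + 1] := by
      unfold pvP
      rw [pv_range_drop_succ, List.filter_append]
    unfold pvLoopA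
    cases hl : (xs.getD (i + 1) []).lookup key with
    | none =>
      have h1 : List.filter (fun j => (xs.getD j []).lookup key == some true) [i + 1] = [] := by
        rw [List.filter_cons]
        simp only [hl, List.filter_nil]
        rfl
      have h2 : List.filter (fun j => ((xs.getD j []).lookup key).isSome) [i + 1] = [] := by
        rw [List.filter_cons]
        simp only [hl, List.filter_nil]
        rfl
      simp only []
      rw [ih]
      unfold pvDecide
      rw [hT, hP, h1, h2, List.append_nil, List.append_nil]
    | some v =>
      cases v with
      | true =>
        have h1 : List.filter (fun j => (xs.getD j []).lookup key == some true) [i + 1] = [i + 1] := by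
          rw [List.filter_cons]
          simp only [hl, List.filter_nil]
          rfl
        have hf : (pvT key xs (i + 1)).max? = some (i + 1) := by
          rw [hT, h1]
          exact pv_max?_lt_append _ _ (pv_mem_pvT_lt key xs i)
        simp only []
        rw [if_pos trivial]
        unfold pvDecide
        rw [hf]
        push_cast
        ring
      | false =>
        have h1 : List.filter (fun j => (xs.getD j []).lookup key == some true) [i + 1] = [] := by
          rw [List.filter_cons]
          simp only [hl, List.filter_nil]
          rfl
        have h2 : List.filter (fun j => ((xs.getD j []).lookup key).isSome) [i + 1] = [i + 1] := by
          rw [List.filter_cons]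
          simp only [hl, List.filter_nil]
          rfl
        have hf : (pvP key xs (i + 1)).max? = some (i + 1) := by
          rw [hP, h2]
          exact pv_max?_lt_append _ _ (pv_mem_pvP_lt key xs i)
        simp only []
        rw [if_neg (by decide), ih]
        unfold pvDecide
        rw [hT, h1, List.append_nil, hf]
        cases hmx : (pvT key xs i).max? with
        | some j => simp only []
        | none =>
          simp only []
          by_cases hm : m = 1
          · subst hm
            rw [if_pos rfl]
            rw [if_neg (by push_cast; omega), if_pos rfl]
            push_cast
            ring
          · simp [hm]

theorem pv_main (doc : String × Int) (xs : List (List (String × Bool))) :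
    intersection_multiplier doc xs = intersection_multiplier_alt doc xs := by
  unfold intersection_multiplier intersection_multiplier_alt
  rw [pv_loop_eq]
  unfold pvDecide pvT pvP
  cases xs with
  | nil => rfl
  | cons h t => simp

-- ===== VERDICT (by name: the statement is the Claim_ definition above) =====
theorem intersection_multiplier_spec : Claim_equal_intersection_multiplier := by
  intro doc xs _
  unfold Spec_intersection_multiplier
  exact pv_main doc xs
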